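-- pv_equiv track=rewrite | github.com/zwx0208/intro-to-computing-notes | 10/田忌赛马.py | tianji
-- ===== SOURCE A (Python) =====
-- def tianji(t_horse,k_horse,n):
--     t_horse.sort(reverse=True)
--     k_horse.sort(reverse=True)
--     money=0
--     t_left,t_right=0,n-1
--     k_left,k_right=0,n-1
--     for _ in range(n):
--         if t_horse[t_left] >k_horse[k_left]:
--             t_left += 1
--             k_left += 1
--             money += 200
--         elif t_horse[t_left] <k_horse[k_left]:
--             t_right -= 1
--             k_left += 1
--             money -= 200
--         else:
--             if t_horse[t_right]>k_horse[k_right]: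
--                 t_right -= 1
--                 k_right -= 1
--                 money += 200
--             else:
--                 if t_horse[t_right] < k_horse[k_left]:
--                     money-=200
--                 t_right -= 1
--                 k_left += 1
--
--     return money
-- ===== SOURCE B (Python) =====
-- def tianji(t_horse, k_horse, n):
--     t_horse.sort(reverse=True)
--     k_horse.sort(reverse=True)
--     t = t_horse[:n] if n > 0 else []
--     k = k_horse[:n] if n > 0 else []
--     money = 0
--     while t:
--         if t[0] > k[0]:
--             money += 200
--             del t[0]
--             del k[0]
--         elif t[0] < k[0]:
--             money -= 200
--             t.pop()
--             del k[0]
--         elif t[-1] > k[-1]: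
--             money += 200
--             t.pop()
--             k.pop()
--         else:
--             if t[-1] < k[0]:
--                 money -= 200
--             t.pop()
--             del k[0]
--     return money
-- ===== Notes on version B (the rewrite author's own statement) =====
-- stated objective: simpler
-- what changed: A's loop over four in-place index pointers (t_left/t_right/k_left/k_right) into two fixed arrays is replaced by a loop that consumes working copies of the two lists themselves from either end (head/last, del/pop), so no pointer bookkeeping remains.
-- outside the precondition, e.g. on tianji([0], [1, 1], 2): A returns -400, B returns -200
import Mathlib
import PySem

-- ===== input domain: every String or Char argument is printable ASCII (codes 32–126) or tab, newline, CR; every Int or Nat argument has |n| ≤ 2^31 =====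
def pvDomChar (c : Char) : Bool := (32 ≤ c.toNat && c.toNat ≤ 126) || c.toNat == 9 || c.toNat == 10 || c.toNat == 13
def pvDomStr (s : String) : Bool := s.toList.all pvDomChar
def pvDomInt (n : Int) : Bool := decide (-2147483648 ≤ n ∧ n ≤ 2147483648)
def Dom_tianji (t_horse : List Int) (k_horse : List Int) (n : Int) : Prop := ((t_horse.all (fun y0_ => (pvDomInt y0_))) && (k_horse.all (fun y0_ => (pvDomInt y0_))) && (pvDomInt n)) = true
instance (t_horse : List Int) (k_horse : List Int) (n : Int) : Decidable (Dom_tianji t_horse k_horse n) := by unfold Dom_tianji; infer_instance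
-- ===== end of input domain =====

-- B replaces A's four-pointer index loop by a loop over the shrinking list segments
-- (objective: simpler — no pointer bookkeeping). Both A and B sort the two argument
-- lists in place (descending); the side effect is identical, the theorems are about the
-- return value.

-- ===== PORT A =====
-- A's for-loop: fuel = remaining iterations, state (money, t_left, t_right, k_left, k_right)
def tianjiLoop (ts ks : List Int) : Nat → Int → Int → Int → Int → Int → Int
  | 0, money, _, _, _, _ => money
  | m+1, money, tl, tr, kl, kr =>
    if PySem.List.pyGetD ts tl 0 > PySem.List.pyGetD ks kl 0 then
      tianjiLoop ts ks m (money + 200) (tl + 1) tr (kl + 1) kr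
    else if PySem.List.pyGetD ts tl 0 < PySem.List.pyGetD ks kl 0 then
      tianjiLoop ts ks m (money - 200) tl (tr - 1) (kl + 1) kr
    else if PySem.List.pyGetD ts tr 0 > PySem.List.pyGetD ks kr 0 then
      tianjiLoop ts ks m (money + 200) tl (tr - 1) kl (kr - 1)
    else
      tianjiLoop ts ks m
        (if PySem.List.pyGetD ts tr 0 < PySem.List.pyGetD ks kl 0 then money - 200 else money)
        tl (tr - 1) (kl + 1) kr

def tianji (t_horse : List Int) (k_horse : List Int) (n : Int) : Int :=
  let ts := PySem.List.sorted t_horse (fun x => x) true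
  let ks := PySem.List.sorted k_horse (fun x => x) true
  tianjiLoop ts ks n.toNat 0 0 (n - 1) 0 (n - 1)

-- ===== PORT B =====
-- Source B's while-loop: the remaining segments t, k and money; on a nonempty list,
-- Python's 'del l[0]' is exactly List.tail and 'l.pop()' exactly List.dropLast
def raceLoop (t k : List Int) (money : Int) : Int :=
  if h : t = [] then money
  else if PySem.List.pyGetD t 0 0 > PySem.List.pyGetD k 0 0 then
    raceLoop t.tail k.tail (money + 200)
  else if PySem.List.pyGetD t 0 0 < PySem.List.pyGetD k 0 0 then
    raceLoop t.dropLast k.tail (money - 200)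
  else if PySem.List.pyGetD t (-1) 0 > PySem.List.pyGetD k (-1) 0 then
    raceLoop t.dropLast k.dropLast (money + 200)
  else
    raceLoop t.dropLast k.tail
      (if PySem.List.pyGetD t (-1) 0 < PySem.List.pyGetD k 0 0 then money - 200 else money)
termination_by t.length
decreasing_by
  all_goals
    simp
  all_goals
    exact List.length_pos_iff.mpr h

def tianji_alt (t_horse : List Int) (k_horse : List Int) (n : Int) : Int :=
  let ts := PySem.List.sorted t_horse (fun x => x) true
  let ks := PySem.List.sorted k_horse (fun x => x) true
  let t := if n > 0 then PySem.List.slice ts none (some n) else []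
  let k := if n > 0 then PySem.List.slice ks none (some n) else []
  raceLoop t k 0

-- ===== PRECONDITION & SPEC =====
-- Pre_ excludes n greater than a list's length: there A either raises IndexError or returns
-- a value only via Python's negative-index wraparound, an accident of its pointer arithmetic.
def Pre_tianji (t_horse : List Int) (k_horse : List Int) (n : Int) : Prop :=
  n ≤ (t_horse.length : Int) ∧ n ≤ (k_horse.length : Int)
instance (t_horse : List Int) (k_horse : List Int) (n : Int) : Decidable (Pre_tianji t_horse k_horse n) := by unfold Pre_tianji; infer_instance

def pvWitness_tianji : List Int × List Int × Int := ([3, 1], [2, 2], 2)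

def Spec_tianji (t_horse : List Int) (k_horse : List Int) (n : Int) (out : Int) : Prop := out = tianji_alt t_horse k_horse n
instance (t_horse : List Int) (k_horse : List Int) (n : Int) (out : Int) : Decidable (Spec_tianji t_horse k_horse n out) := by unfold Spec_tianji; infer_instance

-- ===== CLAIM (what is proved, stated in full; the proofs are below) =====
def Claim_equal_tianji : Prop := ∀ (t_horse : List Int) (k_horse : List Int) (n : Int), Dom_tianji t_horse k_horse n → Pre_tianji t_horse k_horse n → Spec_tianji t_horse k_horse n (tianji t_horse k_horse n)

-- ===== LEMMAS AND PROOFS =====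

lemma seg_ne_nil (xs : List Int) (a m : Nat) (h : a + (m + 1) ≤ xs.length) :
    (xs.drop a).take (m + 1) ≠ [] := by
  have : ((xs.drop a).take (m + 1)).length = m + 1 := by
    simp; omega
  intro hnil
  simp [hnil] at this

lemma seg_head (xs : List Int) (a m : Nat) (h : a + (m + 1) ≤ xs.length) :
    PySem.List.pyGetD ((xs.drop a).take (m + 1)) 0 0 = PySem.List.pyGetD xs (a : Int) 0 := by
  rw [PySem.List.pyGetD_zero, PySem.List.pyGetD_natCast]
  have ha : a < xs.length := by omega
  simp [List.getD_eq_getElem?_getD, ha]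

lemma seg_last (xs : List Int) (a m : Nat) (h : a + (m + 1) ≤ xs.length) :
    PySem.List.pyGetD ((xs.drop a).take (m + 1)) (-1) 0 = PySem.List.pyGetD xs ((a + m : Nat) : Int) 0 := by
  have hne := seg_ne_nil xs a m h
  rw [PySem.List.pyGetD_neg_one _ _ hne, PySem.List.pyGetD_natCast]
  have hlen : ((xs.drop a).take (m + 1)).length = m + 1 := by simp; omega
  have ham : a + m < xs.length := by omega
  rw [List.getLast_eq_getElem]
  simp only [hlen]
  simp [List.getElem_take, List.getElem_drop, List.getD_eq_getElem?_getD, List.getElem?_eq_getElem ham]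

lemma seg_tail (xs : List Int) (a m : Nat) :
    ((xs.drop a).take (m + 1)).tail = (xs.drop (a + 1)).take m := by
  cases hd : xs.drop a with
  | nil =>
    have h2 : xs.drop (a + 1) = [] := by rw [← List.tail_drop, hd]; rfl
    simp [h2]
  | cons y ys =>
    have : xs.drop (a + 1) = ys := by
      rw [← List.tail_drop, hd]; rfl
    simp [this]

lemma seg_dropLast (xs : List Int) (a m : Nat) (h : a + (m + 1) ≤ xs.length) :
    ((xs.drop a).take (m + 1)).dropLast = (xs.drop a).take m := by
  rw [List.dropLast_eq_take]
  have hlen : ((xs.drop a).take (m + 1)).length = m + 1 := by simp; omega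
  rw [hlen]
  simp [List.take_take]

lemma loop_eq (ts ks : List Int) :
    ∀ (m a b : Nat) (money : Int), a + m ≤ ts.length → b + m ≤ ks.length →
      tianjiLoop ts ks m money (a : Int) ((a : Int) + (m : Int) - 1) (b : Int) ((b : Int) + (m : Int) - 1)
        = raceLoop ((ts.drop a).take m) ((ks.drop b).take m) money := by
  intro m
  induction m with
  | zero =>
    intro a b money h1 h2
    rw [raceLoop]
    simp [tianjiLoop]
  | succ mm ih =>
    intro a b money h1 h2
    have hcast : ((mm + 1 : Nat) : Int) = (mm : Int) + 1 := by push_cast; ring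
    have htr : ((a : Int) + ((mm + 1 : Nat) : Int) - 1) = ((a + mm : Nat) : Int) := by push_cast; ring
    have hkr : ((b : Int) + ((mm + 1 : Nat) : Int) - 1) = ((b + mm : Nat) : Int) := by push_cast; ring
    have htne := seg_ne_nil ts a mm h1
    conv_rhs => rw [raceLoop]
    rw [dif_neg htne]
    rw [seg_head ts a mm h1, seg_head ks b mm h2, seg_last ts a mm h1, seg_last ks b mm h2]
    rw [seg_tail ts a mm, seg_tail ks b mm, seg_dropLast ts a mm h1, seg_dropLast ks b mm h2]
    show tianjiLoop ts ks (mm + 1) money (a : Int) ((a : Int) + ((mm + 1 : Nat) : Int) - 1)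
        (b : Int) ((b : Int) + ((mm + 1 : Nat) : Int) - 1) = _
    rw [tianjiLoop, htr, hkr]
    by_cases h01 : PySem.List.pyGetD ts (a : Int) 0 > PySem.List.pyGetD ks (b : Int) 0
    · rw [if_pos h01, if_pos h01]
      have e1 : ((a : Int) + 1) = ((a + 1 : Nat) : Int) := by push_cast; ring
      have e2 : ((a + mm : Nat) : Int) = ((a + 1 : Nat) : Int) + (mm : Int) - 1 := by push_cast; ring
      have e3 : ((b : Int) + 1) = ((b + 1 : Nat) : Int) := by push_cast; ring
      have e4 : ((b + mm : Nat) : Int) = ((b + 1 : Nat) : Int) + (mm : Int) - 1 := by push_cast; ring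
      rw [e1, e2, e3, e4, ih (a + 1) (b + 1) (money + 200) (by omega) (by omega)]
    · rw [if_neg h01, if_neg h01]
      by_cases h02 : PySem.List.pyGetD ts (a : Int) 0 < PySem.List.pyGetD ks (b : Int) 0
      · rw [if_pos h02, if_pos h02]
        have e2 : ((a + mm : Nat) : Int) - 1 = (a : Int) + (mm : Int) - 1 := by push_cast; ring
        have e3 : ((b : Int) + 1) = ((b + 1 : Nat) : Int) := by push_cast; ring
        have e4 : ((b + mm : Nat) : Int) = ((b + 1 : Nat) : Int) + (mm : Int) - 1 := by push_cast; ring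
        rw [e2, e3, e4, ih a (b + 1) (money - 200) (by omega) (by omega)]
      · rw [if_neg h02, if_neg h02]
        by_cases h03 : PySem.List.pyGetD ts ((a + mm : Nat) : Int) 0 > PySem.List.pyGetD ks ((b + mm : Nat) : Int) 0
        · rw [if_pos h03, if_pos h03]
          have e2 : ((a + mm : Nat) : Int) - 1 = (a : Int) + (mm : Int) - 1 := by push_cast; ring
          have e4 : ((b + mm : Nat) : Int) - 1 = (b : Int) + (mm : Int) - 1 := by push_cast; ring
          rw [e2, e4, ih a b (money + 200) (by omega) (by omega)]
        · rw [if_neg h03, if_neg h03]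
          have e2 : ((a + mm : Nat) : Int) - 1 = (a : Int) + (mm : Int) - 1 := by push_cast; ring
          have e3 : ((b : Int) + 1) = ((b + 1 : Nat) : Int) := by push_cast; ring
          have e4 : ((b + mm : Nat) : Int) = ((b + 1 : Nat) : Int) + (mm : Int) - 1 := by push_cast; ring
          rw [e2, e3, e4, ih a (b + 1) _ (by omega) (by omega)]

-- ===== VERDICT (by name: the statement is the Claim_ definition above) =====
theorem tianji_spec : Claim_equal_tianji := by
  intro t k n _ hpre
  unfold Spec_tianji tianji tianji_alt
  set ts := PySem.List.sorted t (fun x => x) true with hts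
  set ks := PySem.List.sorted k (fun x => x) true with hks
  have hlts : ts.length = t.length := PySem.List.length_sorted ..
  have hlks : ks.length = k.length := PySem.List.length_sorted ..
  by_cases hn : n > 0
  · simp only [if_pos hn]
    have hp := hpre
    unfold Pre_tianji at hp
    have h0 : (n.toNat : Int) = n := Int.toNat_of_nonneg (by omega)
    have h1 : 0 + n.toNat ≤ ts.length := by rw [hlts]; omega
    have h2 : 0 + n.toNat ≤ ks.length := by rw [hlks]; omega
    have hl := loop_eq ts ks n.toNat 0 0 0 h1 h2
    simp only [Nat.cast_zero, zero_add, List.drop_zero] at hl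
    rw [h0] at hl
    rw [hl]
    rw [PySem.List.slice_to (xs := ts) (by omega : (0:Int) ≤ n),
        PySem.List.slice_to (xs := ks) (by omega : (0:Int) ≤ n)]
  · simp only [if_neg hn]
    have h3 : n.toNat = 0 := Int.toNat_of_nonpos (by omega)
    rw [h3, raceLoop]
    simp [tianjiLoop]
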